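-- pv_equiv track=rewrite | github.com/cafe-jun/codingTest-Algo | toss/test6.py | solution
-- ===== SOURCE A (Python) =====
-- from collections import defaultdict
-- import heapq
--
-- def solution(steps_one, names_one, steps_two, names_two, steps_three, names_three):
--     answer = []
--     tmp = []
--     names_dict = defaultdict(int)
--     for i, name in enumerate(names_one):
--         names_dict[name] += steps_one[i]
--
--     for i, name in enumerate(names_two):
--         names_dict[name] += steps_two[i]
--
--     for i, name in enumerate(names_three):
--         names_dict[name] += steps_three[i]
--
--     for v in names_dict.keys():
--         heapq.heappush(tmp, (-1*(names_dict[v]), v))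
--
--     while tmp:
--         answer.append(heapq.heappop(tmp))
--     return answer
-- ===== SOURCE B (Python) =====
-- def solution(steps_one, names_one, steps_two, names_two, steps_three, names_three):
--     totals = {}
--     for steps, names in ((steps_one, names_one), (steps_two, names_two), (steps_three, names_three)):
--         for name, step in zip(names, steps):
--             totals[name] = totals.get(name, 0) + step
--     return sorted((-total, name) for name, total in totals.items())
-- ===== Notes on version B (the rewrite author's own statement) =====
-- stated objective: simpler
-- what changed: The heap (push-all then pop-while loop) is removed entirely: B aggregates name totals in one merged loop over the three (steps, names) pairs via zip and produces the answer with a single sorted() call over (-total, name) tuples, relying on lexicographic tuple order for the steps-desc/name-asc tie-break.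
import Mathlib
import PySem

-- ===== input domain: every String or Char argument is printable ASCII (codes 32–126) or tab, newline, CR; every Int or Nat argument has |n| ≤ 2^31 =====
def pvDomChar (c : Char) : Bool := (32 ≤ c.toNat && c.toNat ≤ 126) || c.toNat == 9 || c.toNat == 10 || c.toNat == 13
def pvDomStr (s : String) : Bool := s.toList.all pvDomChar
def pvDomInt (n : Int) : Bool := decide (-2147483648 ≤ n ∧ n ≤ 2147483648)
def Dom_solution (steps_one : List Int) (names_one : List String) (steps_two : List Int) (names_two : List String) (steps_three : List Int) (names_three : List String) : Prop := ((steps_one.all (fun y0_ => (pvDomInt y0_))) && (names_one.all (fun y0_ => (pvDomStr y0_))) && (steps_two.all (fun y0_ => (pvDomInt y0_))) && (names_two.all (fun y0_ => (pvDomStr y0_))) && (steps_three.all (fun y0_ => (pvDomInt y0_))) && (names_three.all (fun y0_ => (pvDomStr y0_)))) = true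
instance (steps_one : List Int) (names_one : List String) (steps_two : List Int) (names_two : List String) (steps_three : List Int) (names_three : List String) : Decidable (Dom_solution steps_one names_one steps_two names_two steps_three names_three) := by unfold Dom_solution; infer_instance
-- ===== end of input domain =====

-- ===== PORT A =====
-- B removes the heapq push/pop machinery in favour of zip-aggregation and one sorted() call (objective: simpler).
-- Pre_ excludes the inputs on which A raises IndexError (a names list longer than its steps list).

-- Python tuple '<' on (int, str): lexicographic (first ints, then strings).
def pvTupLt (a b : Int × String) : Bool :=
  decide (a.1 < b.1) || (a.1 == b.1 && decide (a.2 < b.2))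

-- heapq._siftdown(heap, startpos, pos) with newitem pending at pos: the while loop, step for
-- step (indices are nonnegative at every call, so Nat arithmetic is exact; heap[pos] = newitem at
-- loop exit is the final .set). The fuel argument only bounds the loop: pos strictly decreases,
-- so with fuel > pos the fuel-0 guard is never reached.
def pvSiftdownGo : Nat → List (Int × String) → Nat → Nat → Int × String → List (Int × String)
  | 0, heap, _, pos, newitem => heap.set pos newitem
  | fuel + 1, heap, startpos, pos, newitem =>
    if startpos < pos then
      if pvTupLt newitem (heap.getD ((pos - 1) / 2) (0, "")) then
        pvSiftdownGo fuel (heap.set pos (heap.getD ((pos - 1) / 2) (0, "")))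
          startpos ((pos - 1) / 2) newitem
      else heap.set pos newitem
    else heap.set pos newitem

def pvSiftdown (heap : List (Int × String)) (startpos pos : Nat) (newitem : Int × String) :
    List (Int × String) :=
  pvSiftdownGo (pos + 1) heap startpos pos newitem

-- heapq._siftup(heap, pos) (with its trailing _siftdown call); the childpos selection is the
-- inner branch. Fuel bounds the loop: pos strictly increases below heap.length, so
-- heap.length - pos iterations suffice and the fuel-0 guard is never reached.
def pvSiftupGo : Nat → List (Int × String) → Nat → Nat → Int × String → List (Int × String)
  | 0, heap, startpos, pos, newitem => pvSiftdown heap startpos pos newitem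
  | fuel + 1, heap, startpos, pos, newitem =>
    if 2 * pos + 1 < heap.length then
      if 2 * pos + 2 < heap.length ∧
          ¬ pvTupLt (heap.getD (2 * pos + 1) (0, "")) (heap.getD (2 * pos + 2) (0, "")) = true then
        pvSiftupGo fuel (heap.set pos (heap.getD (2 * pos + 2) (0, "")))
          startpos (2 * pos + 2) newitem
      else
        pvSiftupGo fuel (heap.set pos (heap.getD (2 * pos + 1) (0, "")))
          startpos (2 * pos + 1) newitem
    else pvSiftdown heap startpos pos newitem

def pvSiftup (heap : List (Int × String)) (startpos pos : Nat) (newitem : Int × String) :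
    List (Int × String) :=
  pvSiftupGo (heap.length - pos) heap startpos pos newitem

-- heapq.heappush(heap, item): heap.append(item); _siftdown(heap, 0, len(heap)-1).
def pvHeappush (heap : List (Int × String)) (item : Int × String) : List (Int × String) :=
  pvSiftdown (heap ++ [item]) 0 heap.length item

-- heapq.heappop(heap): lastelt = heap.pop() (IndexError on an empty heap — the call site only
-- pops while the heap is nonempty, so that input never reaches this function).
def pvHeappop (heap : List (Int × String)) : (Int × String) × List (Int × String) :=
  if heap.dropLast = [] then (heap.getLast?.getD (0, ""), [])
  else (heap.dropLast.getD 0 (0, ""),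
        pvSiftup (heap.dropLast.set 0 (heap.getLast?.getD (0, ""))) 0 0
          (heap.getLast?.getD (0, "")))

-- while tmp: answer.append(heapq.heappop(tmp)); fuel bounds the loop (each pop shortens the
-- heap by one, so tmp.length iterations suffice and the fuel-0 guard is never reached)
def pvPopAllGo : Nat → List (Int × String) → List (Int × String) → List (Int × String)
  | 0, answer, _ => answer
  | fuel + 1, answer, tmp =>
    if tmp = [] then answer
    else pvPopAllGo fuel (answer ++ [(pvHeappop tmp).1]) (pvHeappop tmp).2

def pvPopAll (answer : List (Int × String)) (tmp : List (Int × String)) : List (Int × String) :=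
  pvPopAllGo tmp.length answer tmp

def solution (steps_one : List Int) (names_one : List String) (steps_two : List Int) (names_two : List String) (steps_three : List Int) (names_three : List String) : List (Int × String) :=
  let d1 := (PySem.List.enumerate names_one 0).foldl
    (fun d p => d.modify p.2 0 (· + PySem.List.pyGetD steps_one p.1 0)) PySem.Dict.empty
  let d2 := (PySem.List.enumerate names_two 0).foldl
    (fun d p => d.modify p.2 0 (· + PySem.List.pyGetD steps_two p.1 0)) d1
  let d3 := (PySem.List.enumerate names_three 0).foldl
    (fun d p => d.modify p.2 0 (· + PySem.List.pyGetD steps_three p.1 0)) d2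
  let tmp := d3.keys.foldl (fun t v => pvHeappush t (-1 * d3.getD v 0, v)) []
  pvPopAll [] tmp

-- ===== PORT B =====
def solution_alt (steps_one : List Int) (names_one : List String) (steps_two : List Int) (names_two : List String) (steps_three : List Int) (names_three : List String) : List (Int × String) :=
  let totals := [(steps_one, names_one), (steps_two, names_two), (steps_three, names_three)].foldl
    (fun t (p : List Int × List String) =>
      (p.2.zip p.1).foldl (fun t q => t.insert q.1 (t.getD q.1 0 + q.2)) t)
    PySem.Dict.empty
  PySem.List.sorted2 (totals.items.map (fun p => (-p.2, p.1))) Prod.fst Prod.snd false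

-- ===== PRECONDITION & SPEC =====
-- Pre_ excludes exactly the inputs on which A raises IndexError: a names list longer than its
-- steps list makes A read steps[i] past the end; A returns normally on every other input.
def Pre_solution (steps_one : List Int) (names_one : List String) (steps_two : List Int) (names_two : List String) (steps_three : List Int) (names_three : List String) : Prop :=
  names_one.length ≤ steps_one.length ∧ names_two.length ≤ steps_two.length ∧
    names_three.length ≤ steps_three.length
instance (steps_one : List Int) (names_one : List String) (steps_two : List Int) (names_two : List String) (steps_three : List Int) (names_three : List String) : Decidable (Pre_solution steps_one names_one steps_two names_two steps_three names_three) := by unfold Pre_solution; infer_instance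

def pvWitness_solution : List Int × List String × List Int × List String × List Int × List String :=
  ([3, 5], ["ana", "bob"], [2], ["ana"], [], [])

def Spec_solution (steps_one : List Int) (names_one : List String) (steps_two : List Int) (names_two : List String) (steps_three : List Int) (names_three : List String) (out : List (Int × String)) : Prop := out = solution_alt steps_one names_one steps_two names_two steps_three names_three
instance (steps_one : List Int) (names_one : List String) (steps_two : List Int) (names_two : List String) (steps_three : List Int) (names_three : List String) (out : List (Int × String)) : Decidable (Spec_solution steps_one names_one steps_two names_two steps_three names_three out) := by unfold Spec_solution; infer_instance

-- ===== CLAIM (what is proved, stated in full; the proofs are below) =====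
def Claim_equal_solution : Prop := ∀ (steps_one : List Int) (names_one : List String) (steps_two : List Int) (names_two : List String) (steps_three : List Int) (names_three : List String), Dom_solution steps_one names_one steps_two names_two steps_three names_three → Pre_solution steps_one names_one steps_two names_two steps_three names_three → Spec_solution steps_one names_one steps_two names_two steps_three names_three (solution steps_one names_one steps_two names_two steps_three names_three)

-- ===== LEMMAS AND PROOFS =====

-- ## order facts about the tuple comparison --------------------------------------------------

lemma pvTupLt_iff {a b : Int × String} :
    pvTupLt a b = true ↔ (a.1 < b.1 ∨ (a.1 = b.1 ∧ a.2 < b.2)) := by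
  simp [pvTupLt]

lemma pvTupLt_false_iff {a b : Int × String} :
    pvTupLt a b = false ↔ (¬ a.1 < b.1 ∧ (a.1 = b.1 → ¬ a.2 < b.2)) := by
  rw [Bool.eq_false_iff, Ne, pvTupLt_iff]
  tauto

lemma pvTupLt_irrefl (a : Int × String) : pvTupLt a a = false := by
  rw [pvTupLt_false_iff]; simp

lemma pvTupLt_asymm {a b : Int × String} (h : pvTupLt a b = true) : pvTupLt b a = false := by
  rw [pvTupLt_iff] at h
  rw [pvTupLt_false_iff]
  rcases h with h | ⟨h1, h2⟩
  · exact ⟨by omega, fun he => absurd he (by omega)⟩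
  · exact ⟨by omega, fun _ => not_lt_of_gt h2⟩

lemma pvTupLt_total {a b : Int × String} (h : a ≠ b) :
    pvTupLt a b = true ∨ pvTupLt b a = true := by
  rw [pvTupLt_iff, pvTupLt_iff]
  rcases lt_trichotomy a.1 b.1 with h1 | h1 | h1
  · exact Or.inl (Or.inl h1)
  · have h2 : a.2 ≠ b.2 := by
      intro he; exact h (Prod.ext h1 he)
    rcases lt_or_gt_of_ne h2 with h3 | h3
    · exact Or.inl (Or.inr ⟨h1, h3⟩)
    · exact Or.inr (Or.inr ⟨h1.symm, h3⟩)
  · exact Or.inr (Or.inl h1)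

lemma pvNotLt_trans {a b c : Int × String} (h1 : pvTupLt b a = false) (h2 : pvTupLt c b = false) :
    pvTupLt c a = false := by
  rw [pvTupLt_false_iff] at h1 h2 ⊢
  obtain ⟨h1a, h1b⟩ := h1
  obtain ⟨h2a, h2b⟩ := h2
  constructor
  · omega
  · intro he
    have hba : b.1 = a.1 := by omega
    have hcb : c.1 = b.1 := by omega
    intro hlt
    exact h2b hcb (lt_of_lt_of_le hlt (not_lt.mp (h1b hba)))

lemma pvLt_of_lt_of_le {a b c : Int × String} (h1 : pvTupLt b c = true)
    (h2 : pvTupLt a c = false) : pvTupLt b a = true := by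
  rw [pvTupLt_iff] at h1 ⊢
  rw [pvTupLt_false_iff] at h2
  obtain ⟨h2a, h2b⟩ := h2
  rcases h1 with h1 | ⟨h1, h1'⟩
  · left; omega
  · rcases lt_or_eq_of_le (not_lt.mp h2a) with h3 | h3
    · left; omega
    · right
      exact ⟨by omega, lt_of_lt_of_le h1' (not_lt.mp (h2b h3.symm))⟩

lemma pvLt_false_of {a b c : Int × String} (h1 : pvTupLt b c = true)
    (h2 : pvTupLt a c = false) : pvTupLt a b = false :=
  pvTupLt_asymm (pvLt_of_lt_of_le h1 h2)

-- ## small list facts: getD over set/append, counting, the two-position swap permutation ------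

lemma pv_getD_set_self {l : List (Int × String)} {i : Nat} (h : i < l.length)
    (a d : Int × String) : (l.set i a).getD i d = a := by
  rw [List.getD_eq_getElem?_getD, List.getElem?_set_self h]
  rfl

lemma pv_getD_set_ne {l : List (Int × String)} {i j : Nat} (h : i ≠ j)
    (a d : Int × String) : (l.set i a).getD j d = l.getD j d := by
  rw [List.getD_eq_getElem?_getD, List.getElem?_set_ne h, ← List.getD_eq_getElem?_getD]

lemma pv_getD_append_left {l l' : List (Int × String)} {i : Nat} (h : i < l.length)
    (d : Int × String) : (l ++ l').getD i d = l.getD i d := by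
  rw [List.getD_eq_getElem?_getD, List.getElem?_append_left h, ← List.getD_eq_getElem?_getD]

lemma pv_set_append_self (l : List (Int × String)) (x : Int × String) :
    (l ++ [x]).set l.length x = l ++ [x] := by
  induction l with
  | nil => rfl
  | cons b t ih => simp [List.set_cons_succ, ih]

lemma pv_count_set : ∀ (l : List (Int × String)) (i : Nat), i < l.length →
    ∀ (a x : Int × String),
    (l.set i a).count x + (if l.getD i (0, "") = x then 1 else 0)
      = l.count x + (if a = x then 1 else 0) := by
  intro l
  induction l with
  | nil => intro i hi; simp at hi
  | cons b t ih =>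
    intro i hi a x
    cases i with
    | zero =>
      simp only [List.set_cons_zero, List.count_cons, List.getD_cons_zero, beq_iff_eq]
      split_ifs <;> omega
    | succ j =>
      have hj : j < t.length := by simpa using hi
      have := ih j hj a x
      simp only [List.set_cons_succ, List.count_cons, List.getD_cons_succ, beq_iff_eq]
      split_ifs at this ⊢ <;> omega

lemma pvSwapPerm (l : List (Int × String)) (i j : Nat) (a : Int × String)
    (hij : i ≠ j) (hi : i < l.length) (hj : j < l.length) :
    ((l.set i (l.getD j (0, ""))).set j a).Perm (l.set i a) := by
  rw [List.perm_iff_count]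
  intro x
  have h1 := pv_count_set (l.set i (l.getD j (0, ""))) j (by simpa using hj) a x
  have h2 := pv_count_set l i hi (l.getD j (0, "")) x
  have h3 := pv_count_set l i hi a x
  rw [pv_getD_set_ne hij] at h1
  split_ifs at h1 h2 h3 <;> omega

-- ## heap order invariant and correctness of the sifts ---------------------------------------

def pvIsHeap (h : List (Int × String)) : Prop :=
  ∀ i, 0 < i → i < h.length →
    pvTupLt (h.getD i (0, "")) (h.getD ((i - 1) / 2) (0, "")) = false

lemma pvIsHeap_nil : pvIsHeap [] := by
  intro i _ hi
  simp at hi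

lemma pvSiftdownGo_length : ∀ (fuel : Nat) (heap : List (Int × String)) (s p : Nat)
    (x : Int × String), (pvSiftdownGo fuel heap s p x).length = heap.length := by
  intro fuel
  induction fuel with
  | zero => intro heap s p x; simp [pvSiftdownGo]
  | succ fuel ih =>
    intro heap s p x
    simp only [pvSiftdownGo]
    split_ifs <;> simp [ih, List.length_set]

lemma pvSiftdown_length (heap : List (Int × String)) (s p : Nat) (x : Int × String) :
    (pvSiftdown heap s p x).length = heap.length := by
  simp [pvSiftdown, pvSiftdownGo_length]

lemma pvSiftupGo_length : ∀ (fuel : Nat) (heap : List (Int × String)) (s p : Nat)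
    (x : Int × String), (pvSiftupGo fuel heap s p x).length = heap.length := by
  intro fuel
  induction fuel with
  | zero => intro heap s p x; simp [pvSiftupGo, pvSiftdown_length]
  | succ fuel ih =>
    intro heap s p x
    simp only [pvSiftupGo]
    split_ifs <;> simp [ih, List.length_set, pvSiftdown_length]

lemma pvSiftup_length (heap : List (Int × String)) (s p : Nat) (x : Int × String) :
    (pvSiftup heap s p x).length = heap.length := by
  simp [pvSiftup, pvSiftupGo_length]

lemma pvHeappop_length (heap : List (Int × String)) (h : heap ≠ []) :
    (pvHeappop heap).2.length + 1 = heap.length := by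
  rw [pvHeappop]
  by_cases hb : heap.dropLast = []
  · rw [if_pos hb]
    have h1 := @List.length_dropLast _ heap
    rw [hb] at h1
    have hlen : heap.length ≠ 0 := by simpa using h
    simp at h1 ⊢
    omega
  · rw [if_neg hb]
    have hlen : heap.length ≠ 0 := by simpa using h
    simp [pvSiftup_length, List.length_dropLast]
    omega

lemma pvSiftdownGo_spec : ∀ (fuel : Nat) (pos : Nat) (g : List (Int × String)) (x : Int × String),
    pos < fuel → pos < g.length →
    (∀ i, 0 < i → i < g.length → i ≠ pos → (i - 1) / 2 ≠ pos →
      pvTupLt (g.getD i (0, "")) (g.getD ((i - 1) / 2) (0, "")) = false) →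
    (∀ i, 0 < i → i < g.length → (i - 1) / 2 = pos →
      pvTupLt (g.getD i (0, "")) x = false ∧
        (0 < pos → pvTupLt (g.getD i (0, "")) (g.getD ((pos - 1) / 2) (0, "")) = false)) →
    pvIsHeap (pvSiftdownGo fuel g 0 pos x) ∧ (pvSiftdownGo fuel g 0 pos x).Perm (g.set pos x) := by
  intro fuel
  induction fuel with
  | zero => intro pos g x hfuel; omega
  | succ fuel IH =>
    intro pos g x hfuel hpos hA hB
    simp only [pvSiftdownGo]
    by_cases h0 : 0 < pos
    · rw [if_pos h0]
      by_cases hlt : pvTupLt x (g.getD ((pos - 1) / 2) (0, "")) = true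
      · rw [if_pos hlt]
        have hp' : (pos - 1) / 2 < pos := by omega
        have hplen : (pos - 1) / 2 < g.length := by omega
        have hstep := IH ((pos - 1) / 2)
          (g.set pos (g.getD ((pos - 1) / 2) (0, ""))) x
          (by omega) (by simpa using hplen)
          (by
            intro i hi hilen hine hipar
            rw [List.length_set] at hilen
            by_cases hie : i = pos
            · exfalso; apply hipar; omega
            · by_cases hie2 : (i - 1) / 2 = pos
              · rw [pv_getD_set_ne (by omega), hie2, pv_getD_set_self hpos]
                exact (hB i hi hilen hie2).2 h0
              · rw [pv_getD_set_ne (by omega), pv_getD_set_ne (by omega)]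
                exact hA i hi hilen hie hie2)
          (by
            intro i hi hilen hipar
            rw [List.length_set] at hilen
            by_cases hie : i = pos
            · constructor
              · rw [hie, pv_getD_set_self hpos]
                exact pvTupLt_asymm hlt
              · intro hp0
                rw [hie, pv_getD_set_self hpos, pv_getD_set_ne (by omega)]
                exact hA ((pos - 1) / 2) hp0 hplen (by omega) (by omega)
            · have hile : pvTupLt (g.getD i (0, "")) (g.getD ((i - 1) / 2) (0, "")) = false :=
                hA i hi hilen hie (by omega)
              rw [hipar] at hile
              constructor
              · rw [pv_getD_set_ne (by omega)]
                exact pvLt_false_of hlt hile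
              · intro hp0
                rw [pv_getD_set_ne (by omega), pv_getD_set_ne (by omega)]
                have hpe : pvTupLt (g.getD ((pos - 1) / 2) (0, ""))
                    (g.getD (((pos - 1) / 2 - 1) / 2) (0, "")) = false :=
                  hA ((pos - 1) / 2) hp0 hplen (by omega) (by omega)
                exact pvNotLt_trans hpe hile)
        refine ⟨hstep.1, hstep.2.trans ?_⟩
        exact pvSwapPerm g pos ((pos - 1) / 2) x (by omega) hpos hplen
      · rw [if_neg hlt]
        rw [Bool.not_eq_true] at hlt
        constructor
        · intro i hi hilen
          rw [List.length_set] at hilen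
          by_cases hie : i = pos
          · subst hie
            rw [pv_getD_set_self hpos, pv_getD_set_ne (by omega)]
            exact hlt
          · by_cases hie2 : (i - 1) / 2 = pos
            · rw [pv_getD_set_ne (by omega), hie2, pv_getD_set_self hpos]
              exact (hB i hi hilen hie2).1
            · rw [pv_getD_set_ne (by omega), pv_getD_set_ne (by omega)]
              exact hA i hi hilen hie hie2
        · exact List.Perm.refl _
    · rw [if_neg h0]
      have hpe : pos = 0 := by omega
      subst hpe
      constructor
      · intro i hi hilen
        rw [List.length_set] at hilen
        by_cases hie2 : (i - 1) / 2 = 0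
        · rw [pv_getD_set_ne (by omega), hie2, pv_getD_set_self hpos]
          exact (hB i hi hilen hie2).1
        · rw [pv_getD_set_ne (by omega), pv_getD_set_ne (by omega)]
          exact hA i hi hilen (by omega) hie2
      · exact List.Perm.refl _

lemma pvSiftdown_spec : ∀ (pos : Nat) (g : List (Int × String)) (x : Int × String),
    pos < g.length →
    (∀ i, 0 < i → i < g.length → i ≠ pos → (i - 1) / 2 ≠ pos →
      pvTupLt (g.getD i (0, "")) (g.getD ((i - 1) / 2) (0, "")) = false) →
    (∀ i, 0 < i → i < g.length → (i - 1) / 2 = pos →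
      pvTupLt (g.getD i (0, "")) x = false ∧
        (0 < pos → pvTupLt (g.getD i (0, "")) (g.getD ((pos - 1) / 2) (0, "")) = false)) →
    pvIsHeap (pvSiftdown g 0 pos x) ∧ (pvSiftdown g 0 pos x).Perm (g.set pos x) := by
  intro pos g x hpos hA hB
  simp only [pvSiftdown]
  exact pvSiftdownGo_spec (pos + 1) pos g x (by omega) hpos hA hB

lemma pvSiftupGo_spec : ∀ (fuel : Nat) (g : List (Int × String)) (pos : Nat) (x : Int × String),
    g.length - pos ≤ fuel → pos < g.length →
    (∀ i, 0 < i → i < g.length → i ≠ pos → (i - 1) / 2 ≠ pos →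
      pvTupLt (g.getD i (0, "")) (g.getD ((i - 1) / 2) (0, "")) = false) →
    (0 < pos → ∀ i, i < g.length → (i - 1) / 2 = pos →
      pvTupLt (g.getD i (0, "")) (g.getD ((pos - 1) / 2) (0, "")) = false) →
    pvIsHeap (pvSiftupGo fuel g 0 pos x) ∧ (pvSiftupGo fuel g 0 pos x).Perm (g.set pos x) := by
  intro fuel
  induction fuel with
  | zero => intro g pos x hn hpos _ _; omega
  | succ fuel IH =>
    intro g pos x hn hpos hA hC
    simp only [pvSiftupGo]
    by_cases hc : 2 * pos + 1 < g.length
    · rw [if_pos hc]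
      -- both branches pick a child c with parent c = pos, minimal among the present children
      have hmain : ∀ c, pos < c → c < g.length → (c - 1) / 2 = pos →
          (∀ s, 0 < s → s < g.length → (s - 1) / 2 = pos →
            pvTupLt (g.getD s (0, "")) (g.getD c (0, "")) = false) →
          pvIsHeap (pvSiftupGo fuel (g.set pos (g.getD c (0, ""))) 0 c x) ∧
            (pvSiftupGo fuel (g.set pos (g.getD c (0, ""))) 0 c x).Perm (g.set pos x) := by
        intro c hposc hclen hcpar hmin
        have hstep := IH (g.set pos (g.getD c (0, ""))) c x
          (by rw [List.length_set]; omega) (by simpa using hclen)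
          (by
            intro i hi hilen hine hipar
            rw [List.length_set] at hilen
            by_cases hie : i = pos
            · rw [hie, pv_getD_set_self hpos, pv_getD_set_ne (by omega)]
              exact hC (by omega) c hclen hcpar
            · by_cases hie2 : (i - 1) / 2 = pos
              · rw [pv_getD_set_ne (by omega), hie2, pv_getD_set_self hpos]
                exact hmin i hi hilen hie2
              · rw [pv_getD_set_ne (by omega), pv_getD_set_ne (by omega)]
                exact hA i hi hilen hie hie2)
          (by
            intro _ i hilen hipar
            rw [List.length_set] at hilen
            rw [hcpar, pv_getD_set_ne (by omega), pv_getD_set_self hpos]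
            have hedge := hA i (by omega) hilen (by omega) (by omega)
            rw [hipar] at hedge
            exact hedge)
        refine ⟨hstep.1, hstep.2.trans ?_⟩
        exact pvSwapPerm g pos c x (by omega) hpos hclen
      by_cases h2 : 2 * pos + 2 < g.length ∧
          ¬ pvTupLt (g.getD (2 * pos + 1) (0, "")) (g.getD (2 * pos + 2) (0, "")) = true
      · rw [if_pos h2]
        obtain ⟨h2a, h2b⟩ := h2
        rw [Bool.not_eq_true] at h2b
        apply hmain (2 * pos + 2) (by omega) h2a (by omega)
        intro s hs0 hslen hspar
        have hse : s = 2 * pos + 1 ∨ s = 2 * pos + 2 := by omega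
        rcases hse with hse | hse <;> subst hse
        · exact h2b
        · exact pvTupLt_irrefl _
      · rw [if_neg h2]
        apply hmain (2 * pos + 1) (by omega) hc (by omega)
        intro s hs0 hslen hspar
        have hse : s = 2 * pos + 1 ∨ s = 2 * pos + 2 := by omega
        rcases hse with hse | hse <;> subst hse
        · exact pvTupLt_irrefl _
        · have h3 : pvTupLt (g.getD (2 * pos + 1) (0, ""))
              (g.getD (2 * pos + 2) (0, "")) = true := by
            by_contra h4
            exact h2 ⟨hslen, h4⟩
          exact pvTupLt_asymm h3
    · rw [if_neg hc]
      apply pvSiftdown_spec pos g x hpos hA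
      intro i hi hilen hipar
      omega

lemma pvSiftup_spec : ∀ (g : List (Int × String)) (pos : Nat) (x : Int × String),
    pos < g.length →
    (∀ i, 0 < i → i < g.length → i ≠ pos → (i - 1) / 2 ≠ pos →
      pvTupLt (g.getD i (0, "")) (g.getD ((i - 1) / 2) (0, "")) = false) →
    (0 < pos → ∀ i, i < g.length → (i - 1) / 2 = pos →
      pvTupLt (g.getD i (0, "")) (g.getD ((pos - 1) / 2) (0, "")) = false) →
    pvIsHeap (pvSiftup g 0 pos x) ∧ (pvSiftup g 0 pos x).Perm (g.set pos x) := by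
  intro g pos x hpos hA hC
  simp only [pvSiftup]
  exact pvSiftupGo_spec (g.length - pos) g pos x le_rfl hpos hA hC

-- ## heappush / heappop / popAll specifications ----------------------------------------------

lemma pvHeappush_spec {hp : List (Int × String)} (hh : pvIsHeap hp) (x : Int × String) :
    pvIsHeap (pvHeappush hp x) ∧ (pvHeappush hp x).Perm (x :: hp) := by
  rw [pvHeappush]
  have hlen : hp.length < (hp ++ [x]).length := by simp
  have hstep := pvSiftdown_spec hp.length (hp ++ [x]) x hlen
    (by
      intro i hi hilen hine hipar
      simp only [List.length_append, List.length_cons, List.length_nil] at hilen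
      have hi2 : i < hp.length := by omega
      rw [pv_getD_append_left hi2, pv_getD_append_left (by omega)]
      exact hh i hi hi2)
    (by
      intro i hi hilen hipar
      simp only [List.length_append, List.length_cons, List.length_nil] at hilen
      omega)
  refine ⟨hstep.1, hstep.2.trans ?_⟩
  rw [pv_set_append_self]
  exact List.perm_append_singleton x hp

lemma pvRootMin {hp : List (Int × String)} (hh : pvIsHeap hp) :
    ∀ y ∈ hp, pvTupLt y (hp.getD 0 (0, "")) = false := by
  have hidx : ∀ i, i < hp.length → pvTupLt (hp.getD i (0, "")) (hp.getD 0 (0, "")) = false := by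
    intro i
    induction i using Nat.strong_induction_on with
    | _ i IH =>
      intro hilen
      by_cases hi0 : i = 0
      · subst hi0; exact pvTupLt_irrefl _
      · have hpar := hh i (by omega) hilen
        have hup := IH ((i - 1) / 2) (by omega) (by omega)
        exact pvNotLt_trans hup hpar
  intro y hy
  obtain ⟨i, hi, rfl⟩ := List.mem_iff_getElem.mp hy
  rw [← List.getD_eq_getElem hp (0, "") hi]
  exact hidx i hi

lemma pvHeappop_spec {hp : List (Int × String)} (hne : hp ≠ []) (hh : pvIsHeap hp) :
    hp.Perm ((pvHeappop hp).1 :: (pvHeappop hp).2) ∧ pvIsHeap (pvHeappop hp).2 ∧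
      ∀ y ∈ hp, pvTupLt y (pvHeappop hp).1 = false := by
  have hlast : hp.getLast?.getD (0, "") = hp.getLast hne := by
    rw [List.getLast?_eq_some_getLast hne]
    rfl
  rw [pvHeappop]
  by_cases hb : hp.dropLast = []
  · rw [if_pos hb]
    have hlen1 : hp.length = 1 := by
      have h1 := @List.length_dropLast _ hp
      rw [hb] at h1
      simp only [List.length_nil] at h1
      have h2 : hp.length ≠ 0 := fun h => hne (List.length_eq_zero_iff.mp h)
      omega
    obtain ⟨a, rfl⟩ := List.length_eq_one_iff.mp hlen1
    refine ⟨by simp, pvIsHeap_nil, ?_⟩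
    intro y hy
    simp only [List.mem_singleton] at hy
    simpa [hy] using pvTupLt_irrefl a
  · rw [if_neg hb]
    have hsplit : hp.dropLast ++ [hp.getLast hne] = hp := List.dropLast_concat_getLast hne
    have hblen : 0 < hp.dropLast.length := List.length_pos_iff.mpr hb
    have hdl : hp.dropLast.length + 1 = hp.length := by
      conv_rhs => rw [← hsplit]
      simp
    have hstep := pvSiftup_spec
      (hp.dropLast.set 0 (hp.getLast?.getD (0, ""))) 0 (hp.getLast?.getD (0, ""))
      (by simpa using hblen)
      (by
        intro i hi hilen hine hipar
        rw [List.length_set] at hilen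
        have hpar2 : (i - 1) / 2 < hp.dropLast.length := by omega
        rw [pv_getD_set_ne (by omega), pv_getD_set_ne (by omega)]
        have hg1 : hp.getD i (0, "") = hp.dropLast.getD i (0, "") := by
          conv_lhs => rw [← hsplit]
          rw [pv_getD_append_left hilen]
        have hg2 : hp.getD ((i - 1) / 2) (0, "") = hp.dropLast.getD ((i - 1) / 2) (0, "") := by
          conv_lhs => rw [← hsplit]
          rw [pv_getD_append_left hpar2]
        rw [← hg1, ← hg2]
        exact hh i hi (by omega))
      (by intro h0; omega)
    rw [List.set_set] at hstep
    constructor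
    · -- hp ~ head :: sifted
      obtain ⟨b0, t, hbt⟩ : ∃ b0 t, hp.dropLast = b0 :: t := by
        cases hcb : hp.dropLast with
        | nil => exact absurd hcb hb
        | cons b0 t => exact ⟨b0, t, rfl⟩
      have hpeq : hp = b0 :: (t ++ [hp.getLast hne]) := by
        conv_lhs => rw [← hsplit]
        rw [hbt]
        simp
      have hperm2 := hstep.2
      rw [hbt] at hperm2
      simp only [List.set_cons_zero] at hperm2
      rw [hbt, List.getD_cons_zero]
      conv_lhs => rw [hpeq]
      refine List.Perm.cons _ ?_
      refine (List.perm_append_singleton _ _).trans ?_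
      rw [← hlast]
      exact hperm2.symm
    · refine ⟨hstep.1, ?_⟩
      intro y hy
      have hroot := pvRootMin hh y hy
      have h00 : hp.dropLast.getD 0 (0, "") = hp.getD 0 (0, "") := by
        conv_rhs => rw [← hsplit]
        rw [pv_getD_append_left hblen]
      rw [h00]
      exact hroot

lemma pvPopAllGo_spec : ∀ (fuel : Nat) (tmp : List (Int × String)), tmp.length ≤ fuel →
    pvIsHeap tmp →
    ∀ acc, ∃ out, pvPopAllGo fuel acc tmp = acc ++ out ∧ out.Perm tmp ∧
      out.Pairwise (fun a b => pvTupLt b a = false) := by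
  intro fuel
  induction fuel with
  | zero =>
    intro tmp hlen _ acc
    have : tmp = [] := by
      cases tmp with
      | nil => rfl
      | cons a t => simp at hlen
    subst this
    exact ⟨[], by simp [pvPopAllGo], List.Perm.refl _, List.Pairwise.nil⟩
  | succ fuel IH =>
    intro tmp hlen hh acc
    by_cases hne : tmp = []
    · subst hne
      exact ⟨[], by simp [pvPopAllGo], List.Perm.refl _, List.Pairwise.nil⟩
    · have hpop := pvHeappop_spec hne hh
      have hlen2 := pvHeappop_length tmp hne
      obtain ⟨out, hout, hperm, hpw⟩ := IH (pvHeappop tmp).2 (by omega) hpop.2.1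
        (acc ++ [(pvHeappop tmp).1])
      refine ⟨(pvHeappop tmp).1 :: out, ?_, ?_, ?_⟩
      · simp only [pvPopAllGo]
        rw [if_neg hne, hout]
        simp
      · exact (hperm.cons _).trans hpop.1.symm
      · refine List.Pairwise.cons ?_ hpw
        intro z hz
        have hz2 : z ∈ tmp := hpop.1.symm.subset (List.mem_cons_of_mem _ (hperm.subset hz))
        exact hpop.2.2 z hz2

lemma pvPopAll_spec (tmp : List (Int × String)) (hh : pvIsHeap tmp) (acc : List (Int × String)) :
    ∃ out, pvPopAll acc tmp = acc ++ out ∧ out.Perm tmp ∧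
      out.Pairwise (fun a b => pvTupLt b a = false) := by
  simp only [pvPopAll]
  exact pvPopAllGo_spec tmp.length tmp le_rfl hh acc

-- ## pushing every (-total, name) then popping everything = one lexicographic sort -----------

lemma pvFoldPush : ∀ (l : List String) (h : List (Int × String)) (f : String → Int × String),
    pvIsHeap h →
    pvIsHeap (l.foldl (fun t v => pvHeappush t (f v)) h) ∧
      (l.foldl (fun t v => pvHeappush t (f v)) h).Perm (h ++ l.map f) := by
  intro l
  induction l with
  | nil =>
    intro h f hh
    refine ⟨hh, ?_⟩
    simp
  | cons v l ih =>
    intro h f hh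
    have hpush := pvHeappush_spec hh (f v)
    have hrec := ih (pvHeappush h (f v)) f hpush.1
    refine ⟨hrec.1, hrec.2.trans ?_⟩
    simp only [List.map_cons]
    refine (List.Perm.append_right (l.map f) hpush.2).trans ?_
    exact (List.perm_middle).symm

lemma pv_insertBy_pairwise (x : Int × String) : ∀ (ys : List (Int × String)),
    ys.Pairwise (fun a b => pvTupLt b a = false) →
    (PySem.List.insertBy pvTupLt x ys).Pairwise (fun a b => pvTupLt b a = false) := by
  intro ys
  induction ys with
  | nil => intro _; simp [PySem.List.insertBy]
  | cons y ys ih =>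
    intro hpw
    rw [List.pairwise_cons] at hpw
    rw [PySem.List.insertBy]
    by_cases hxy : pvTupLt x y = true
    · rw [if_pos hxy]
      refine List.Pairwise.cons ?_ (List.Pairwise.cons hpw.1 hpw.2)
      intro z hz
      rcases List.mem_cons.mp hz with rfl | hz2
      · exact pvTupLt_asymm hxy
      · exact pvLt_false_of hxy (hpw.1 z hz2)
    · rw [if_neg hxy]
      refine List.Pairwise.cons ?_ (ih hpw.2)
      intro z hz
      rcases (PySem.List.mem_insertBy pvTupLt x z ys).mp hz with rfl | hz2
      · exact Bool.eq_false_iff.mpr hxy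
      · exact hpw.1 z hz2

lemma pv_foldl_insertBy_pairwise : ∀ (xs acc : List (Int × String)),
    acc.Pairwise (fun a b => pvTupLt b a = false) →
    (xs.foldl (fun acc x => PySem.List.insertBy pvTupLt x acc) acc).Pairwise
      (fun a b => pvTupLt b a = false) := by
  intro xs
  induction xs with
  | nil => intro acc h; simpa using h
  | cons x xs ih =>
    intro acc h
    exact ih _ (pv_insertBy_pairwise x acc h)

lemma pv_sorted2_eq (xs : List (Int × String)) :
    PySem.List.sorted2 xs Prod.fst Prod.snd false
      = xs.foldl (fun acc x => PySem.List.insertBy pvTupLt x acc) [] := by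
  have hb : (fun (a b : Int × String) =>
      (decide (a.1 < b.1) || (!decide (b.1 < a.1) && decide (a.2 < b.2)))) = pvTupLt := by
    funext a b
    by_cases h1 : a.1 < b.1
    · simp [pvTupLt, h1]
    · by_cases h2 : a.1 = b.1
      · simp [pvTupLt, h2]
      · simp [pvTupLt, h1, h2, show b.1 < a.1 by omega]
  have hunfold : PySem.List.sorted2 xs Prod.fst Prod.snd false
      = xs.foldl (fun acc x => PySem.List.insertBy
          (fun a b => decide (a.1 < b.1) || (!decide (b.1 < a.1) && decide (a.2 < b.2))) x acc)
          [] := rfl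
  rw [hunfold, hb]

lemma pv_eq_of_perm : ∀ (l1 l2 : List (Int × String)), l1.Perm l2 →
    l1.Pairwise (fun a b => pvTupLt a b = true) →
    l2.Pairwise (fun a b => pvTupLt b a = false) → l1 = l2 := by
  intro l1
  induction l1 with
  | nil =>
    intro l2 hperm _ _
    exact (hperm.symm.eq_nil).symm
  | cons a t1 ih =>
    intro l2 hperm hpw1 hpw2
    cases l2 with
    | nil => exact absurd hperm.eq_nil (by simp)
    | cons b t2 =>
      rw [List.pairwise_cons] at hpw1 hpw2
      by_cases hab : a = b
      · subst hab
        rw [ih t2 hperm.cons_inv hpw1.2 hpw2.2]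
      · exfalso
        have hbt1 : b ∈ t1 := by
          have : b ∈ a :: t1 := hperm.mem_iff.mpr (List.mem_cons_self)
          rcases List.mem_cons.mp this with h | h
          · exact absurd h.symm hab
          · exact h
        have hat2 : a ∈ t2 := by
          have : a ∈ b :: t2 := hperm.mem_iff.mp (List.mem_cons_self)
          rcases List.mem_cons.mp this with h | h
          · exact absurd h hab
          · exact h
        have h1 : pvTupLt a b = true := hpw1.1 b hbt1
        have h2 : pvTupLt a b = false := hpw2.1 a hat2
        rw [h1] at h2
        cases h2

-- the whole pipeline on an arbitrary aggregation dict with distinct keys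
lemma pvMain (D : PySem.Dict String Int) (hnd : D.keys.Nodup) :
    pvPopAll [] (D.keys.foldl (fun t v => pvHeappush t (-1 * D.getD v 0, v)) []) =
      PySem.List.sorted2 (D.items.map (fun p => (-p.2, p.1))) Prod.fst Prod.snd false := by
  have hfold := pvFoldPush D.keys [] (fun v => (-1 * D.getD v 0, v)) pvIsHeap_nil
  obtain ⟨hheap, hperm⟩ := hfold
  obtain ⟨out, hout, houtperm, houtpw⟩ := pvPopAll_spec _ hheap []
  have hM : D.keys.map (fun v => (-1 * D.getD v 0, v)) = D.items.map (fun p => (-p.2, p.1)) := by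
    rw [PySem.Dict.items_eq_map_keys D hnd 0, List.map_map]
    simp [Function.comp]
  rw [List.nil_append] at hperm
  have houtM : out.Perm (D.items.map (fun p => (-p.2, p.1))) := by
    rw [← hM]
    exact houtperm.trans hperm
  have hnodup : out.Nodup := by
    refine houtM.symm.nodup ?_
    rw [← hM]
    apply List.Nodup.map ?_ hnd
    intro u v huv
    exact congrArg Prod.snd huv
  have hpwlt : out.Pairwise (fun a b => pvTupLt a b = true) := by
    have hcomb := List.Pairwise.and houtpw hnodup
    refine hcomb.imp ?_
    rintro a b ⟨hle, hne⟩
    rcases pvTupLt_total hne with h | h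
    · exact h
    · rw [h] at hle; cases hle
  have hsortpw : (PySem.List.sorted2 (D.items.map (fun p => (-p.2, p.1))) Prod.fst Prod.snd
      false).Pairwise (fun a b => pvTupLt b a = false) := by
    rw [pv_sorted2_eq]
    exact pv_foldl_insertBy_pairwise _ [] List.Pairwise.nil
  have hsortperm : out.Perm (PySem.List.sorted2 (D.items.map (fun p => (-p.2, p.1))) Prod.fst
      Prod.snd false) :=
    houtM.trans (PySem.List.sorted2_perm _ _ _ _).symm
  rw [hout, List.nil_append]
  exact pv_eq_of_perm out _ hsortperm hpwlt hsortpw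

-- the three enumerate/index loops of A equal the three zip loops of B (within Pre_)
lemma pvZipFold (names : List String) : ∀ (steps : List Int) (k : Nat)
    (d : PySem.Dict String Int), k + names.length ≤ steps.length →
    (PySem.List.enumerate names (k : Int)).foldl
        (fun d p => d.modify p.2 0 (· + PySem.List.pyGetD steps p.1 0)) d
      = (names.zip (steps.drop k)).foldl
          (fun t q => t.insert q.1 (t.getD q.1 0 + q.2)) d := by
  induction names with
  | nil => intro steps k d _; simp [PySem.List.enumerate_nil]
  | cons nm ns ih =>
    intro steps k d hlen
    have hk : k < steps.length := by simp at hlen; omega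
    rw [PySem.List.enumerate_cons, List.drop_eq_getElem_cons hk]
    simp only [List.zip_cons_cons, List.foldl_cons]
    have hcast : (k : Int) + 1 = ((k + 1 : Nat) : Int) := by push_cast; ring
    rw [hcast, ih steps (k + 1) _ (by simp at hlen ⊢; omega)]
    congr 1
    simp only [PySem.Dict.modify, PySem.List.pyGetD_natCast]
    rw [List.getD_eq_getElem steps 0 hk]

lemma pvZipFold0 (names : List String) (steps : List Int) (d : PySem.Dict String Int)
    (h : names.length ≤ steps.length) :
    (PySem.List.enumerate names 0).foldl
        (fun d p => d.modify p.2 0 (· + PySem.List.pyGetD steps p.1 0)) d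
      = (names.zip steps).foldl (fun t q => t.insert q.1 (t.getD q.1 0 + q.2)) d := by
  have := pvZipFold names steps 0 d (by omega)
  simpa using this


-- ===== VERDICT (by name: the statement is the Claim_ definition above) =====
theorem solution_spec : Claim_equal_solution := by
  unfold Claim_equal_solution
  intro s1 n1 s2 n2 s3 n3 _ hpre
  obtain ⟨h1, h2, h3⟩ := hpre
  unfold Spec_solution
  show solution s1 n1 s2 n2 s3 n3 = solution_alt s1 n1 s2 n2 s3 n3
  simp only [solution, solution_alt, List.foldl_cons, List.foldl_nil]
  rw [pvZipFold0 n1 s1 _ h1, pvZipFold0 n2 s2 _ h2, pvZipFold0 n3 s3 _ h3]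
  apply pvMain
  apply PySem.Dict.nodup_keys_foldl_insert_key _ Prod.fst (fun t q => t.getD q.1 0 + q.2)
  apply PySem.Dict.nodup_keys_foldl_insert_key _ Prod.fst (fun t q => t.getD q.1 0 + q.2)
  apply PySem.Dict.nodup_keys_foldl_insert_key _ Prod.fst (fun t q => t.getD q.1 0 + q.2)
  exact PySem.Dict.nodup_keys_empty
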